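-- pv_equiv track=rewrite | github.com/ChrisRoyse/Cortesia | vectors/dynamic_universal_chunker.py | _find_brace_block_end
-- ===== SOURCE A (Python) =====
-- from typing import List, Dict, Optional, Tuple, Any, Set
--
-- def _find_brace_block_end(lines: List[str], start_idx: int) -> int:
--     """Find end using brace counting"""
--     brace_count = 0
--     paren_count = 0
--     in_string = False
--     string_char = None
--
--     for i in range(start_idx, len(lines)):
--         line = lines[i]
--
--         for char in line:
--             # Handle string literals
--             if char in ['"', "'"] and not in_string:
--                 in_string = True
--                 string_char = char
--             elif char == string_char and in_string:
--                 in_string = False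
--                 string_char = None
--             elif in_string:
--                 continue
--
--             # Count braces and parentheses
--             if char == '{':
--                 brace_count += 1
--             elif char == '}':
--                 brace_count -= 1
--             elif char == '(':
--                 paren_count += 1
--             elif char == ')':
--                 paren_count -= 1
--
--         # If we've closed all braces and we had some
--         if brace_count == 0 and i > start_idx:
--             # Make sure we actually had braces
--             if any('{' in lines[j] for j in range(start_idx, i + 1)):
--                 return i + 1
--
--     return len(lines)
-- ===== SOURCE B (Python) =====
-- def _scan_line(line, string_char):
--     """One pass over a line: net brace delta outside string literals, plus the
--     string-literal state at end of line."""
--     delta = 0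
--     for ch in line:
--         if string_char is not None:
--             if ch == string_char:
--                 string_char = None
--         elif ch == '"' or ch == "'":
--             string_char = ch
--         elif ch == '{':
--             delta += 1
--         elif ch == '}':
--             delta -= 1
--     return delta, string_char
--
-- def _find_brace_block_end(lines, start_idx):
--     """Find end using brace counting (single pass: a boolean flag replaces the
--     per-iteration rescan of all earlier lines, and the unused paren count is dropped)."""
--     depth = 0
--     string_char = None
--     saw_brace = False
--     for i in range(start_idx, len(lines)):
--         line = lines[i]
--         delta, string_char = _scan_line(line, string_char)
--         depth += delta
--         saw_brace = saw_brace or '{' in line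
--         if depth == 0 and i > start_idx and saw_brace:
--             return i + 1
--     return len(lines)
-- ===== Notes on version B (the rewrite author's own statement) =====
-- stated objective: faster
-- what changed: B maintains a single boolean 'saw a brace' flag updated once per line instead of A's any() rescan of all lines from start_idx on every candidate end line, and drops the unused paren counter; the inner scan becomes a small explicit state machine.
import Mathlib
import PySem

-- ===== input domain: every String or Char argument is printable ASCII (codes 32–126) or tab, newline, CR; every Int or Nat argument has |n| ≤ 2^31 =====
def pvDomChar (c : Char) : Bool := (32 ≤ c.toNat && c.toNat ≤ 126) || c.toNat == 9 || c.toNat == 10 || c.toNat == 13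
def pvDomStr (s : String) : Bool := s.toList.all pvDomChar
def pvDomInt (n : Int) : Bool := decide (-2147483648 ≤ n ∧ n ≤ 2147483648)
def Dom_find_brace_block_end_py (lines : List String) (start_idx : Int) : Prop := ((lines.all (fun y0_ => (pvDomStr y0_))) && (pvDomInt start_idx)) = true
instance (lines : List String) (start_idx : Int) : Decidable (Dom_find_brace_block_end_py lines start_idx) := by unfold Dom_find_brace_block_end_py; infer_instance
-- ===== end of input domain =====

-- B replaces A's per-candidate any() rescan of earlier lines by a boolean flag updated once per
-- line and drops the unused paren counter (measurably faster on long inputs).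


-- ===== PORT A =====
-- the second if-chain of A's char loop (brace/paren counting)
def pvCountA (b p : Int) (ins : Bool) (sc : Option Char) (ch : Char) : Int × Int × Bool × Option Char :=
  if ch = '{' then (b + 1, p, ins, sc)
  else if ch = '}' then (b - 1, p, ins, sc)
  else if ch = '(' then (b, p + 1, ins, sc)
  else if ch = ')' then (b, p - 1, ins, sc)
  else (b, p, ins, sc)

-- one char of A's inner loop: the string-literal if-chain, then (unless 'continue') the counting chain
def pvCharA (st : Int × Int × Bool × Option Char) (ch : Char) : Int × Int × Bool × Option Char :=
  match st with
  | (b, p, ins, sc) =>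
    if (ch = '"' ∨ ch = '\'') ∧ ins = false then pvCountA b p true (some ch) ch
    else if some ch = sc ∧ ins = true then pvCountA b p false none ch
    else if ins = true then (b, p, ins, sc)
    else pvCountA b p ins sc ch

-- any('{' in lines[j] for j in range(a, b)); '{' in s is a single-char substring test = char
-- membership (exact); the getD "" default is only reached where Python would raise (outside Pre_)
def pvAnyBraceA (lines : List String) (a b : Int) : Bool :=
  (PySem.List.pyRange a b 1).any (fun j => ((PySem.List.pyGet? lines j).getD "").toList.contains '{')

-- the 'for i in range(start_idx, len(lines))' loop with early return
def pvLoopA (lines : List String) (start : Int) : List Int → (Int × Int × Bool × Option Char) → Int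
  | [], _ => (lines.length : Int)
  | i :: rest, st =>
    match PySem.List.pyGet? lines i with
    | none => (lines.length : Int)  -- Python raises IndexError here; excluded by Pre_
    | some line =>
      let st' := line.toList.foldl pvCharA st
      if st'.1 = 0 ∧ start < i then
        if pvAnyBraceA lines start (i + 1) then i + 1 else pvLoopA lines start rest st'
      else pvLoopA lines start rest st'

def find_brace_block_end_py (lines : List String) (start_idx : Int) : Int :=
  pvLoopA lines start_idx (PySem.List.pyRange start_idx (lines.length : Int) 1) (0, 0, false, none)

-- ===== PORT B =====
-- one char of B's _scan_line state machine
def pvScanChar (acc : Int × Option Char) (ch : Char) : Int × Option Char :=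
  match acc with
  | (d, some c) => if ch = c then (d, none) else (d, some c)
  | (d, none) =>
    if ch = '"' ∨ ch = '\'' then (d, some ch)
    else if ch = '{' then (d + 1, none)
    else if ch = '}' then (d - 1, none)
    else (d, none)

def pvScanLine (cs : List Char) (sc : Option Char) : Int × Option Char :=
  cs.foldl pvScanChar (0, sc)

-- B's main loop: depth, string state, and the saw_brace flag
def pvLoopB (lines : List String) (start : Int) : List Int → Int → Option Char → Bool → Int
  | [], _, _, _ => (lines.length : Int)
  | i :: rest, depth, sc, flag =>
    match PySem.List.pyGet? lines i with
    | none => (lines.length : Int)  -- Python raises IndexError here; excluded by Pre_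
    | some line =>
      let r := pvScanLine line.toList sc
      let depth' := depth + r.1
      let flag' := flag || line.toList.contains '{'  -- '{' in line (single-char substring = membership)
      if depth' = 0 ∧ start < i ∧ flag' = true then i + 1
      else pvLoopB lines start rest depth' r.2 flag'

def find_brace_block_end_py_alt (lines : List String) (start_idx : Int) : Int :=
  pvLoopB lines start_idx (PySem.List.pyRange start_idx (lines.length : Int) 1) 0 none false

-- ===== PRECONDITION & SPEC =====
-- A (and B) raise IndexError via lines[i] exactly when start_idx < -len(lines); everything else returns.
def Pre_find_brace_block_end_py (lines : List String) (start_idx : Int) : Prop :=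
  -(lines.length : Int) ≤ start_idx
instance (lines : List String) (start_idx : Int) : Decidable (Pre_find_brace_block_end_py lines start_idx) := by unfold Pre_find_brace_block_end_py; infer_instance

def pvWitness_find_brace_block_end_py : List String × Int := (["fn x() {", "  y = '}'", "}"], 0)

def Spec_find_brace_block_end_py (lines : List String) (start_idx : Int) (out : Int) : Prop := out = find_brace_block_end_py_alt lines start_idx
instance (lines : List String) (start_idx : Int) (out : Int) : Decidable (Spec_find_brace_block_end_py lines start_idx out) := by unfold Spec_find_brace_block_end_py; infer_instance

-- ===== CLAIM (what is proved, stated in full; the proofs are below) =====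
def Claim_equal_find_brace_block_end_py : Prop := ∀ (lines : List String) (start_idx : Int), Dom_find_brace_block_end_py lines start_idx → Pre_find_brace_block_end_py lines start_idx → Spec_find_brace_block_end_py lines start_idx (find_brace_block_end_py lines start_idx)

-- ===== LEMMAS AND PROOFS =====

-- one char of B's scan, with a shifted accumulator
lemma pvScanChar_shift (ch : Char) (d : Int) (sc : Option Char) (e : Int) (sc' : Option Char)
    (h : pvScanChar (0, sc) ch = (e, sc')) : pvScanChar (d, sc) ch = (e + d, sc') := by
  cases sc <;> simp only [pvScanChar] at h ⊢ <;> split_ifs at h ⊢ <;>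
    simp_all <;> omega

-- B's line scan, with a shifted accumulator
lemma pvScanLine_shift (cs : List Char) (d : Int) (sc : Option Char) (D : Int) (sc2 : Option Char)
    (h : pvScanLine cs sc = (D, sc2)) : cs.foldl pvScanChar (d, sc) = (D + d, sc2) := by
  induction cs generalizing d sc D sc2 with
  | nil => simp [pvScanLine] at h; simp [h.1, h.2]
  | cons c cs ih =>
    rcases hc : pvScanChar (0, sc) c with ⟨e, sc1⟩
    rcases hrest : pvScanLine cs sc1 with ⟨D1, sc3⟩
    have hL : pvScanLine (c :: cs) sc = (D1 + e, sc3) := by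
      simp only [pvScanLine, List.foldl_cons] at *
      rw [hc]; exact ih e sc1 D1 sc3 hrest
    rw [hL] at h
    rw [List.foldl_cons, pvScanChar_shift c d sc e sc1 hc, ih (e + d) sc1 D1 sc3 hrest]
    simp only [Prod.mk.injEq] at h ⊢
    obtain ⟨h1, h2⟩ := h
    exact ⟨by omega, h2⟩

-- the string state is always none or a quote character
lemma pvScanChar_quote (sc : Option Char) (ch : Char) (e : Int) (sc' : Option Char)
    (h : pvScanChar (0, sc) ch = (e, sc'))
    (hq : sc = none ∨ sc = some '"' ∨ sc = some '\'') :
    sc' = none ∨ sc' = some '"' ∨ sc' = some '\'' := by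
  rcases hq with rfl | rfl | rfl <;> simp only [pvScanChar] at h <;> split_ifs at h <;>
    injection h with h1 h2 <;> subst h2 <;> simp_all

lemma pvScanLine_quote (cs : List Char) (sc : Option Char) (D : Int) (sc2 : Option Char)
    (h : pvScanLine cs sc = (D, sc2))
    (hq : sc = none ∨ sc = some '"' ∨ sc = some '\'') :
    sc2 = none ∨ sc2 = some '"' ∨ sc2 = some '\'' := by
  induction cs generalizing sc D sc2 with
  | nil =>
    simp [pvScanLine] at h
    rw [← h.2]; exact hq
  | cons c cs ih =>
    rcases hc : pvScanChar (0, sc) c with ⟨e, sc1⟩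
    rcases hrest : pvScanLine cs sc1 with ⟨D1, sc3⟩
    have hL : pvScanLine (c :: cs) sc = (D1 + e, sc3) := by
      simp only [pvScanLine, List.foldl_cons] at *
      rw [hc]; exact pvScanLine_shift cs e sc1 D1 sc3 hrest
    rw [hL] at h
    obtain ⟨hD, hsc2⟩ : D1 + e = D ∧ sc3 = sc2 := by simpa using h
    rw [← hsc2]
    exact ih sc1 D1 sc3 hrest (pvScanChar_quote sc c e sc1 hc hq)

-- one char of A's loop vs one char of B's scan (the paren count is dead state;
-- the quote invariant rules out a '{' or '}' ever being the string delimiter)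
lemma pvCharA_step (b p : Int) (sc : Option Char) (ch : Char) (e : Int) (sc' : Option Char)
    (h : pvScanChar (0, sc) ch = (e, sc'))
    (hq : sc = none ∨ sc = some '"' ∨ sc = some '\'') :
    pvCharA (b, p, sc.isSome, sc) ch =
      (b + e, (pvCharA (b, p, sc.isSome, sc) ch).2.1, sc'.isSome, sc') := by
  rcases hq with rfl | rfl | rfl <;>
    simp only [pvScanChar, pvCharA, pvCountA, Option.isSome] at h ⊢ <;>
    split_ifs at h ⊢ <;> obtain ⟨he, hs⟩ := h <;> (try subst hs) <;> (try subst he) <;>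
      simp_all <;> try omega

-- A's char fold vs B's line scan
lemma pvFoldA_eq (cs : List Char) (b p : Int) (sc : Option Char) (D : Int) (sc2 : Option Char)
    (h : pvScanLine cs sc = (D, sc2))
    (hq : sc = none ∨ sc = some '"' ∨ sc = some '\'') :
    cs.foldl pvCharA (b, p, sc.isSome, sc) =
      (b + D, (cs.foldl pvCharA (b, p, sc.isSome, sc)).2.1, sc2.isSome, sc2) := by
  induction cs generalizing b p sc D sc2 with
  | nil => simp [pvScanLine] at h; simp [h.1, h.2]
  | cons c cs ih =>
    rcases hc : pvScanChar (0, sc) c with ⟨e, sc1⟩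
    rcases hrest : pvScanLine cs sc1 with ⟨D1, sc3⟩
    have hL : pvScanLine (c :: cs) sc = (D1 + e, sc3) := by
      simp only [pvScanLine, List.foldl_cons] at *
      rw [hc]; exact pvScanLine_shift cs e sc1 D1 sc3 hrest
    rw [hL] at h
    obtain ⟨hD, hsc2⟩ : D1 + e = D ∧ sc3 = sc2 := by simpa using h
    rw [List.foldl_cons, pvCharA_step b p sc c e sc1 hc hq,
      ih (b + e) ((pvCharA (b, p, sc.isSome, sc) c).2.1) sc1 D1 sc3 hrest
        (pvScanChar_quote sc c e sc1 hc hq), ← hD, ← hsc2]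
    simp only [Prod.mk.injEq, and_true]
    omega

-- the flag update is the rescan, one line further
lemma pvAnyBraceA_succ (lines : List String) (start i : Int) (h : start ≤ i) :
    pvAnyBraceA lines start (i + 1) =
      (pvAnyBraceA lines start i || ((PySem.List.pyGet? lines i).getD "").toList.contains '{') := by
  unfold pvAnyBraceA
  rw [PySem.List.pyRange_one_succ_right h, List.any_append]
  simp

-- main loop equivalence, by fuel on the remaining range
lemma pvLoop_eq (lines : List String) (start : Int) :
    ∀ (n : Nat) (i0 b p : Int) (sc : Option Char),
      sc = none ∨ sc = some '"' ∨ sc = some '\'' →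
      start ≤ i0 → ((lines.length : Int) - i0).toNat = n →
      pvLoopA lines start (PySem.List.pyRange i0 (lines.length : Int) 1) (b, p, sc.isSome, sc) =
        pvLoopB lines start (PySem.List.pyRange i0 (lines.length : Int) 1) b sc
          (pvAnyBraceA lines start i0) := by
  intro n
  induction n with
  | zero =>
    intro i0 b p sc _ _ hn
    rw [PySem.List.pyRange_one_eq_nil (by omega)]
    simp [pvLoopA, pvLoopB]
  | succ n ih =>
    intro i0 b p sc hq hs hn
    have hlt : i0 < (lines.length : Int) := by omega
    rw [PySem.List.pyRange_one_cons hlt]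
    simp only [pvLoopA, pvLoopB]
    cases hg : PySem.List.pyGet? lines i0 with
    | none => rfl
    | some line =>
      rcases hscan : pvScanLine line.toList sc with ⟨D, sc2⟩
      dsimp only
      rw [pvFoldA_eq line.toList b p sc D sc2 hscan hq, hscan]
      dsimp only
      have hflag : (pvAnyBraceA lines start i0 || line.toList.contains '{') =
          pvAnyBraceA lines start (i0 + 1) := by
        rw [pvAnyBraceA_succ lines start i0 hs, hg]
        rfl
      have hrec := ih (i0 + 1) (b + D)
        ((line.toList.foldl pvCharA (b, p, sc.isSome, sc)).2.1) sc2
        (pvScanLine_quote line.toList sc D sc2 hscan hq) (by omega) (by omega)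
      rw [hflag]
      split_ifs <;> first | rfl | exact hrec | (exfalso; tauto)

-- ===== VERDICT (by name: the statement is the Claim_ definition above) =====
theorem find_brace_block_end_py_spec : Claim_equal_find_brace_block_end_py := by
  intro lines start_idx _ _
  unfold Spec_find_brace_block_end_py find_brace_block_end_py find_brace_block_end_py_alt
  have hflag : pvAnyBraceA lines start_idx start_idx = false := by
    unfold pvAnyBraceA
    rw [PySem.List.pyRange_one_eq_nil le_rfl]
    rfl
  have h := pvLoop_eq lines start_idx ((lines.length : Int) - start_idx).toNat start_idx 0 0 none
    (Or.inl rfl) le_rfl rfl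
  rw [hflag] at h
  exact h
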